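-- pv_equiv track=rewrite | github.com/Aasthaengg/IBMdataset | Python_codes/p03147/s634217667.py | solve
-- ===== SOURCE A (Python) =====
-- def solve(l):
--     if len(l) == 1:
--         return l[0]
--
--     min_l = min(l)
--     ans = min_l
--     new_l = []
--     for i in l:
--         i -= min_l
--         if i == 0:
--             if len(new_l) > 0:
--                     ans += solve(new_l)
--                     new_l = []
--         else:
--             new_l.append(i)
--     if len(new_l) > 0:
--         ans += solve(new_l)
--
--     return ans
-- ===== SOURCE B (Python) =====
-- def solve(l):
--     ans = l[0]
--     for prev, cur in zip(l, l[1:]):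
--         if cur > prev:
--             ans += cur - prev
--     return ans
-- ===== Notes on version B (the rewrite author's own statement) =====
-- stated objective: faster
-- what changed: Replaced the recursive min-subtract-and-split-into-segments algorithm by a single linear pass that adds up the positive adjacent differences.
import Mathlib
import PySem

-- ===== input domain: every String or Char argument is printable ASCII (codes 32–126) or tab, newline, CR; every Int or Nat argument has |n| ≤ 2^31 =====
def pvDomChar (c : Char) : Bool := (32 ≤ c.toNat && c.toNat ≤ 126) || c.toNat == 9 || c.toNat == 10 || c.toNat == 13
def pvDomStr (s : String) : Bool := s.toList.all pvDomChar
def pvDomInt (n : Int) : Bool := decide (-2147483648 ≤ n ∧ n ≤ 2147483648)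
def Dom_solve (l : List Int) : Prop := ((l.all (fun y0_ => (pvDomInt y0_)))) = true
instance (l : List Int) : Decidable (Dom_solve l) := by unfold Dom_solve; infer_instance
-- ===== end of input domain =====

-- B replaces A's recursive min-subtract-and-split algorithm by one linear pass summing
-- the positive adjacent differences (measured asymptotically faster: O(n) vs O(n^2) worst case).

-- ===== PORT A =====
-- the loop body of A: state = (ans, new_l); `rec` is the recursive call at the next fuel level
def stepA (m : Int) (rec : List Int → Int) (st : Int × List Int) (i : Int) : Int × List Int :=
  let i' := i - m
  if i' == 0 then
    if st.2.length > 0 then (st.1 + rec st.2, ([] : List Int)) else st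
  else (st.1, st.2 ++ [i'])

-- A's recursion, with a fuel counter as a totality guard (each recursive call is on a strictly
-- shorter list, so fuel = l.length suffices; this is proved inside solve_spec's lemmas)
def solveFuel : Nat → List Int → Int
  | 0, _ => 0
  | f+1, l =>
    if l.length == 1 then l.headD 0
    else
      let m := (PySem.List.min? l (fun x => x)).getD 0
      let s := l.foldl (stepA m (solveFuel f)) (m, ([] : List Int))
      if s.2.length > 0 then s.1 + solveFuel f s.2 else s.1

def solve (l : List Int) : Int := solveFuel l.length l

-- ===== PORT B =====
def solve_alt (l : List Int) : Int :=
  (l.zip (l.drop 1)).foldl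
    (fun ans pc => if pc.1 < pc.2 then ans + (pc.2 - pc.1) else ans)
    (l.headD 0)

-- ===== PRECONDITION & SPEC =====
-- Pre_ excludes only the empty list, on which Python A raises ValueError (min of empty sequence).
def Pre_solve (l : List Int) : Prop := l ≠ []
instance (l : List Int) : Decidable (Pre_solve l) := by unfold Pre_solve; infer_instance
def pvWitness_solve : List Int := [1, 3, 2]

def Spec_solve (l : List Int) (out : Int) : Prop := out = solve_alt l
instance (l : List Int) (out : Int) : Decidable (Spec_solve l out) := by unfold Spec_solve; infer_instance

-- ===== CLAIM (what is proved, stated in full; the proofs are below) =====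
def Claim_equal_solve : Prop := ∀ (l : List Int), Dom_solve l → Pre_solve l → Spec_solve l (solve l)

-- ===== LEMMAS AND PROOFS =====

-- running sum of positive differences, starting from previous value p
def ds (p : Int) : List Int → Int
  | [] => 0
  | c :: t => (if p < c then c - p else 0) + ds c t

theorem ds_cons (p c : Int) (t : List Int) :
    ds p (c :: t) = (if p < c then c - p else 0) + ds c t := rfl

-- the common mathematical value: first element plus sum of positive adjacent differences
def diffsum : List Int → Int
  | [] => 0
  | a :: t => a + ds a t

theorem diffsum_cons (a : Int) (t : List Int) : diffsum (a :: t) = a + ds a t := rfl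

theorem alt_fold (t : List Int) : ∀ (p ans : Int),
    ((p :: t).zip t).foldl
      (fun ans pc => if pc.1 < pc.2 then ans + (pc.2 - pc.1) else ans) ans
    = ans + ds p t := by
  induction t with
  | nil => intro p ans; simp [ds]
  | cons c t ih =>
      intro p ans
      simp only [List.zip_cons_cons, List.foldl_cons, ds, ih c]
      split <;> ring

theorem alt_eq_diffsum (l : List Int) : solve_alt l = diffsum l := by
  cases l with
  | nil => simp [solve_alt, diffsum]
  | cons a t => simpa [solve_alt, diffsum] using alt_fold t a a

theorem ds_shift (t : List Int) : ∀ (p m : Int), ds (p - m) (t.map (fun x => x - m)) = ds p t := by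
  induction t with
  | nil => intro p m; simp [ds]
  | cons c t ih =>
      intro p m
      simp only [List.map_cons, ds, ih c m]
      by_cases h : p < c
      · rw [if_pos (show p - m < c - m by omega), if_pos h]; ring
      · rw [if_neg (show ¬(p - m < c - m) by omega), if_neg h]

theorem ds_zero_nonneg (t : List Int) (h : ∀ x ∈ t, 0 ≤ x) : ds 0 t = diffsum t := by
  cases t with
  | nil => simp [ds, diffsum]
  | cons c t =>
      have hc : 0 ≤ c := h c (by simp)
      simp only [ds, diffsum]
      split <;> omega

theorem ds_append_zero (cur : List Int) : ∀ (p : Int) (t : List Int), cur ≠ [] →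
    (∀ x ∈ cur, 0 ≤ x) → ds p (cur ++ 0 :: t) = ds p cur + ds 0 t := by
  induction cur with
  | nil => intro p t h; exact absurd rfl h
  | cons a r ih =>
      intro p t _ hnn
      cases r with
      | nil =>
          have ha : 0 ≤ a := hnn a (by simp)
          simp only [List.cons_append, List.nil_append, ds]
          split <;> (try split) <;> omega
      | cons b r' =>
          rw [List.cons_append, ds_cons, ds_cons,
            ih a t (by simp) (fun x hx => hnn x (by simp [hx]))]
          ring

theorem diffsum_append_zero (cur t : List Int) (h : cur ≠ []) (hnn : ∀ x ∈ cur, 0 ≤ x) :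
    diffsum (cur ++ 0 :: t) = diffsum cur + ds 0 t := by
  cases cur with
  | nil => exact absurd rfl h
  | cons a r =>
      cases r with
      | nil =>
          have ha : 0 ≤ a := hnn a (by simp)
          simp only [List.cons_append, List.nil_append, diffsum, ds]
          split <;> omega
      | cons b r' =>
          have hd : ∀ (u : List Int), diffsum (a :: u) = a + ds a u := fun u => rfl
          rw [List.cons_append, hd, hd,
            ds_append_zero (b :: r') a t (by simp) (fun x hx => hnn x (by simp [hx]))]
          ring

theorem diffsum_zero_cons (t : List Int) (h : ∀ x ∈ t, 0 ≤ x) :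
    diffsum (0 :: t) = diffsum t := by
  rw [diffsum_cons, ds_zero_nonneg t h]; ring

-- the loop of A, characterised: folding stepA over r from state (ans, cur) and then flushing
-- the trailing segment yields ans + diffsum (cur ++ shifted r)
theorem fold_stepA (k : Nat) (m : Int) (rec : List Int → Int)
    (hrec : ∀ seg : List Int, seg ≠ [] → seg.length ≤ k → rec seg = diffsum seg) :
    ∀ (r : List Int) (ans : Int) (cur : List Int),
    (∀ x ∈ cur, 0 < x) →
    (∀ x ∈ r, m ≤ x) →
    cur.length + r.countP (fun x => decide (x ≠ m)) ≤ k →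
    (let s := r.foldl (stepA m rec) (ans, cur);
     (if s.2.length > 0 then s.1 + rec s.2 else s.1))
      = ans + diffsum (cur ++ r.map (fun x => x - m)) := by
  intro r
  induction r with
  | nil =>
      intro ans cur hpos _ hlen
      cases cur with
      | nil => simp [diffsum]
      | cons a c =>
          simp only [List.foldl_nil]
          have h1 : (a :: c).length > 0 := by simp
          rw [if_pos h1, hrec (a :: c) (by simp) (by simp only [List.countP_nil] at hlen; omega)]
          simp
  | cons x r' ih =>
      intro ans cur hpos hge hlen
      have hxge : m ≤ x := hge x (by simp)
      simp only [List.foldl_cons]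
      by_cases hx : x - m = 0
      · have hxm : x = m := by omega
        have hcnt : (x :: r').countP (fun x => decide (x ≠ m)) = r'.countP (fun x => decide (x ≠ m)) := by
          simp [hxm]
        cases cur with
        | nil =>
            have hstep : stepA m rec (ans, ([] : List Int)) x = (ans, ([] : List Int)) := by
              simp [stepA, hx]
            rw [hstep, ih ans [] (by simp) (fun y hy => hge y (by simp [hy])) (by rw [hcnt] at hlen; simpa using hlen)]
            have hnn : ∀ y ∈ r'.map (fun x => x - m), 0 ≤ y := by
              intro y hy
              obtain ⟨z, hz, rfl⟩ := List.mem_map.mp hy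
              have := hge z (by simp [hz]); omega
            simp only [List.nil_append, List.map_cons, hx]
            rw [diffsum_zero_cons _ hnn]
        | cons a c =>
            have hstep : stepA m rec (ans, a :: c) x = (ans + rec (a :: c), ([] : List Int)) := by
              simp [stepA, hx]
            rw [hstep, ih (ans + rec (a :: c)) [] (by simp) (fun y hy => hge y (by simp [hy]))
                (by rw [hcnt] at hlen; simp only [List.length_nil, List.length_cons] at hlen ⊢; omega)]
            have hseg : rec (a :: c) = diffsum (a :: c) := by
              apply hrec (a :: c) (by simp)
              rw [hcnt] at hlen; omega
            have hnn : ∀ y ∈ r'.map (fun x => x - m), 0 ≤ y := by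
              intro y hy
              obtain ⟨z, hz, rfl⟩ := List.mem_map.mp hy
              have := hge z (by simp [hz]); omega
            rw [hseg, List.map_cons, hx,
              diffsum_append_zero (a :: c) _ (by simp) (fun y hy => le_of_lt (hpos y hy)),
              ds_zero_nonneg _ hnn]
            simp only [List.nil_append]
            ring
      · have hstep : stepA m rec (ans, cur) x = (ans, cur ++ [x - m]) := by
          simp [stepA, hx]
        rw [hstep, ih ans (cur ++ [x - m])
            (by intro y hy
                rcases List.mem_append.mp hy with h | h
                · exact hpos y h
                · simp at h; omega)
            (fun y hy => hge y (by simp [hy]))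
            (by
              have hcnt : (x :: r').countP (fun x => decide (x ≠ m)) = r'.countP (fun x => decide (x ≠ m)) + 1 := by
                have hxm : x ≠ m := by omega
                simp [hxm]
              rw [hcnt] at hlen
              simp only [List.length_append, List.length_cons, List.length_nil]
              omega)]
        simp only [List.map_cons, List.append_assoc, List.cons_append, List.nil_append]

theorem solveFuel_eq_diffsum : ∀ (f : Nat) (l : List Int), l ≠ [] → l.length ≤ f →
    solveFuel f l = diffsum l := by
  intro f
  induction f with
  | zero =>
      intro l hne hlen
      exact absurd (List.length_eq_zero_iff.mp (Nat.le_zero.mp hlen)) hne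
  | succ f ih =>
      intro l hne hlen
      match l, hne with
      | a :: t, _ =>
        by_cases h1 : (a :: t).length = 1
        · have ht : t = [] := by
            cases t with
            | nil => rfl
            | cons b t' => simp at h1
          subst ht
          simp [solveFuel, diffsum, ds]
        · -- general case
          have hne' : (a :: t) ≠ ([] : List Int) := by simp
          obtain ⟨m, hm⟩ : ∃ m, PySem.List.min? (a :: t) (fun x => x) = some m := by
            cases hmin : PySem.List.min? (a :: t) (fun x => x) with
            | none => exact absurd ((PySem.List.min?_eq_none_iff _ _).mp hmin) hne'
            | some m => exact ⟨m, rfl⟩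
          have hmem : m ∈ a :: t := PySem.List.min?_mem hm
          have hmin : ∀ y ∈ a :: t, m ≤ y := fun y hy => PySem.List.min?_isMin hm y hy
          have hcnt : (a :: t).countP (fun x => decide (x ≠ m)) ≤ f := by
            have hlt : (a :: t).countP (fun x => decide (x ≠ m)) < (a :: t).length := by
              rcases Nat.lt_or_ge ((a :: t).countP (fun x => decide (x ≠ m))) ((a :: t).length) with h | h
              · exact h
              · have heq : (a :: t).countP (fun x => decide (x ≠ m)) = (a :: t).length :=
                  Nat.le_antisymm List.countP_le_length h
                have := List.countP_eq_length.mp heq m hmem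
                simp at this
            omega
          have hfold := fold_stepA f m (solveFuel f)
            (fun seg hseg hlenseg => ih seg hseg hlenseg)
            (a :: t) m [] (by simp) hmin (by simpa using hcnt)
          simp only [List.nil_append] at hfold
          have hsolve : solveFuel (f + 1) (a :: t)
              = m + diffsum ((a :: t).map (fun x => x - m)) := by
            rw [show solveFuel (f + 1) (a :: t)
                = (if (a :: t).length == 1 then (a :: t).headD 0
                   else
                     let m' := (PySem.List.min? (a :: t) (fun x => x)).getD 0
                     let s := (a :: t).foldl (stepA m' (solveFuel f)) (m', ([] : List Int))
                     if s.2.length > 0 then s.1 + solveFuel f s.2 else s.1) from rfl]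
            rw [if_neg (by simpa using h1)]
            simp only [hm, Option.getD_some]
            exact hfold
          rw [hsolve]
          -- shift: m + diffsum (map (· - m) l) = diffsum l
          simp only [List.map_cons, diffsum, ds_shift t a m]
          ring

-- ===== VERDICT (by name: the statement is the Claim_ definition above) =====
theorem solve_spec : Claim_equal_solve := by
  intro l _ hpre
  unfold Spec_solve solve
  rw [alt_eq_diffsum, solveFuel_eq_diffsum l.length l hpre le_rfl]
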